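-- pv_equiv track=rewrite | github.com/inaciovasquez2020/chronos-urf-rr | tools/export_fgl_from_petersen_2lift.py | fundamental_cycle_basis
-- ===== SOURCE A (Python) =====
-- from collections import defaultdict, deque
--
-- def adjacency_with_edges(edges):
--     adj = defaultdict(list)
--
--     for i, (u, v) in enumerate(edges):
--         adj[u].append((v, i))
--         adj[v].append((u, i))
--
--     return {k: sorted(vs) for k, vs in adj.items()}
--
-- def fundamental_cycle_basis(edges):
--     adj = adjacency_with_edges(edges)
--     parent = {}
--     parent_edge = {}
--     depth = {}
--     tree_edges = set()
--     visited = set()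
--     basis = []
--
--     for root in sorted(adj):
--         if root in visited:
--             continue
--
--         parent[root] = None
--         parent_edge[root] = None
--         depth[root] = 0
--         visited.add(root)
--         q = deque([root])
--
--         while q:
--             u = q.popleft()
--
--             for v, edge_id in adj[u]:
--                 if v not in visited:
--                     visited.add(v)
--                     parent[v] = u
--                     parent_edge[v] = edge_id
--                     depth[v] = depth[u] + 1
--                     tree_edges.add(edge_id)
--                     q.append(v)
--
--     for edge_id, (u, v) in enumerate(edges):
--         if edge_id in tree_edges:
--             continue
--
--         vec = [0] * len(edges)
--         vec[edge_id] = 1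
--
--         a = u
--         b = v
--
--         while depth[a] > depth[b]:
--             vec[parent_edge[a]] ^= 1
--             a = parent[a]
--
--         while depth[b] > depth[a]:
--             vec[parent_edge[b]] ^= 1
--             b = parent[b]
--
--         while a != b:
--             vec[parent_edge[a]] ^= 1
--             a = parent[a]
--             vec[parent_edge[b]] ^= 1
--             b = parent[b]
--
--         basis.append(vec)
--
--     return basis
-- ===== SOURCE B (Python) =====
-- from collections import defaultdict, deque
--
-- def fundamental_cycle_basis(edges):
--     adj = defaultdict(list)
--     for i, (u, v) in enumerate(edges):
--         adj[u].append((v, i))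
--         adj[v].append((u, i))
--     adj = {k: sorted(vs) for k, vs in adj.items()}
--
--     visited = set()
--     tree_edges = set()
--     rootpath = {}  # node -> tree edge ids from node up to its BFS-tree root (nearest first)
--     for root in sorted(adj):
--         if root in visited:
--             continue
--         rootpath[root] = []
--         visited.add(root)
--         q = deque([root])
--         while q:
--             u = q.popleft()
--             for v, edge_id in adj[u]:
--                 if v not in visited:
--                     visited.add(v)
--                     tree_edges.add(edge_id)
--                     rootpath[v] = [edge_id] + rootpath[u]
--                     q.append(v)
--
--     basis = []
--     for edge_id, (u, v) in enumerate(edges):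
--         if edge_id in tree_edges:
--             continue
--         vec = [0] * len(edges)
--         vec[edge_id] = 1
--         for e in rootpath[u] + rootpath[v]:
--             vec[e] ^= 1
--         basis.append(vec)
--     return basis
-- ===== Notes on version B (the rewrite author's own statement) =====
-- stated objective: alternative
-- what changed: Keeps the identical BFS forest but records each node's root-path edge list during BFS, then builds every cycle vector by XOR-ing the two endpoints' root paths (the shared ancestor-to-root segment cancels), eliminating the parent/parent_edge/depth maps and all three depth-climbing LCA loops.
import Mathlib
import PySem

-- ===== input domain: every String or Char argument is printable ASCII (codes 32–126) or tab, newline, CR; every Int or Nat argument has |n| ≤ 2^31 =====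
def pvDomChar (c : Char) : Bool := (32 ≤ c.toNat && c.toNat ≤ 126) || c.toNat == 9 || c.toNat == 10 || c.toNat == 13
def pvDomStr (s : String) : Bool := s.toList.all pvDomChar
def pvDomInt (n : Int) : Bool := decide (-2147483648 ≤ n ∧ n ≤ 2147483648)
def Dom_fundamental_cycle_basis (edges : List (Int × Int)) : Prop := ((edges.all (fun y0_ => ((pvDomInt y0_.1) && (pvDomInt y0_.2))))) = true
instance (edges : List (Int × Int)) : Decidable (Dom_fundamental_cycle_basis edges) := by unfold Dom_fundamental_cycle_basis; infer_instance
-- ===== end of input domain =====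

-- B replaces the three depth/parent LCA climbing loops by per-node root-path edge
-- lists accumulated during the identical BFS; each cycle vector is the XOR of the
-- two endpoints' root paths (the shared ancestor-to-root part cancels) — an
-- alternative decomposition, not claimed faster.

-- shared model of Python's `vec[i] ^= 1` (both A and B execute this statement)
def pvXor1 (vec : List Int) (i : Int) : List Int :=
  PySem.List.pySetD vec i (PySem.Int.bxor (PySem.List.pyGetD vec i 0) 1)

-- ===== PORT A =====
-- helper adjacency_with_edges (B's Python contains the identical inline code)
def pvAdjRaw (edges : List (Int × Int)) : PySem.Dict Int (List (Int × Int)) :=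
  (PySem.List.enumerate edges).foldl (fun d p =>
    (d.modify p.2.1 [] (· ++ [(p.2.2, p.1)])).modify p.2.2 [] (· ++ [(p.2.1, p.1)]))
    PySem.Dict.empty

def pvAdj (edges : List (Int × Int)) : PySem.Dict Int (List (Int × Int)) :=
  (pvAdjRaw edges).items.foldl
    (fun d p => d.insert p.1 (PySem.List.sorted2 p.2 Prod.fst Prod.snd)) PySem.Dict.empty

structure PvStA where
  parent : PySem.Dict Int (Option Int)
  parentEdge : PySem.Dict Int (Option Int)
  depth : PySem.Dict Int Int
  tree : PySem.Set Int
  visited : PySem.Set Int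

def pvVisitA (u : Int) (s : PvStA × List Int) (vw : Int × Int) : PvStA × List Int :=
  if vw.1 ∈ s.1.visited then s
  else ({ parent := s.1.parent.insert vw.1 (some u),
          parentEdge := s.1.parentEdge.insert vw.1 (some vw.2),
          depth := s.1.depth.insert vw.1 (s.1.depth.getD u 0 + 1),
          tree := PySem.Set.add s.1.tree vw.2,
          visited := PySem.Set.add s.1.visited vw.1 }, s.2 ++ [vw.1])

def pvRunA (adj : PySem.Dict Int (List (Int × Int))) : Nat → PvStA → List Int → PvStA
  | 0, st, _ => st
  | _ + 1, st, [] => st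
  | f + 1, st, u :: rest =>
      let s := (adj.getD u []).foldl (pvVisitA u) (st, rest)
      pvRunA adj f s.1 s.2

def pvBfsA (edges : List (Int × Int)) : PvStA :=
  let adj := pvAdj edges
  (PySem.List.sorted adj.keys (fun x => x) false).foldl
    (fun st root =>
      if root ∈ st.visited then st
      else pvRunA adj (adj.size + 1)
        { parent := st.parent.insert root none,
          parentEdge := st.parentEdge.insert root none,
          depth := st.depth.insert root 0,
          tree := st.tree,
          visited := PySem.Set.add st.visited root }
        [root])
    ⟨PySem.Dict.empty, PySem.Dict.empty, PySem.Dict.empty, [], []⟩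

-- while depth[a] > depth[b]: vec[parent_edge[a]] ^= 1; a = parent[a]
def pvClimbUp (pE pP : PySem.Dict Int (Option Int)) (dD : PySem.Dict Int Int) :
    Nat → Int → Int → List Int → Int × List Int
  | 0, a, _, vec => (a, vec)
  | f + 1, a, b, vec =>
      if dD.getD b 0 < dD.getD a 0 then
        match pE.getD a none, pP.getD a none with
        | some e, some p => pvClimbUp pE pP dD f p b (pvXor1 vec e)
        | _, _ => (a, vec)      -- unreachable: Python would raise here
      else (a, vec)

-- while a != b: toggle both parent edges and step both up
def pvClimbBoth (pE pP : PySem.Dict Int (Option Int)) :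
    Nat → Int → Int → List Int → List Int
  | 0, _, _, vec => vec
  | f + 1, a, b, vec =>
      if a = b then vec
      else
        match pE.getD a none, pP.getD a none, pE.getD b none, pP.getD b none with
        | some e1, some p1, some e2, some p2 =>
            pvClimbBoth pE pP f p1 p2 (pvXor1 (pvXor1 vec e1) e2)
        | _, _, _, _ => vec     -- unreachable: Python would raise here

def fundamental_cycle_basis (edges : List (Int × Int)) : List (List Int) :=
  let st := pvBfsA edges
  let fuel := 2 * edges.length + 1
  (PySem.List.enumerate edges).foldl
    (fun basis p =>
      if p.1 ∈ st.tree then basis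
      else
        let vec0 := PySem.List.pySetD (List.replicate edges.length (0 : Int)) p.1 1
        let r1 := pvClimbUp st.parentEdge st.parent st.depth fuel p.2.1 p.2.2 vec0
        let r2 := pvClimbUp st.parentEdge st.parent st.depth fuel p.2.2 r1.1 r1.2
        let vec := pvClimbBoth st.parentEdge st.parent fuel r1.1 r2.1 r2.2
        basis ++ [vec])
    []

-- ===== PORT B =====
structure PvStB where
  tree : PySem.Set Int
  visited : PySem.Set Int
  rootpath : PySem.Dict Int (List Int)

def pvVisitB (u : Int) (s : PvStB × List Int) (vw : Int × Int) : PvStB × List Int :=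
  if vw.1 ∈ s.1.visited then s
  else ({ tree := PySem.Set.add s.1.tree vw.2,
          visited := PySem.Set.add s.1.visited vw.1,
          rootpath := s.1.rootpath.insert vw.1 (vw.2 :: s.1.rootpath.getD u []) }, s.2 ++ [vw.1])

def pvRunB (adj : PySem.Dict Int (List (Int × Int))) : Nat → PvStB → List Int → PvStB
  | 0, st, _ => st
  | _ + 1, st, [] => st
  | f + 1, st, u :: rest =>
      let s := (adj.getD u []).foldl (pvVisitB u) (st, rest)
      pvRunB adj f s.1 s.2

def pvBfsB (edges : List (Int × Int)) : PvStB :=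
  let adj := pvAdj edges
  (PySem.List.sorted adj.keys (fun x => x) false).foldl
    (fun st root =>
      if root ∈ st.visited then st
      else pvRunB adj (adj.size + 1)
        { tree := st.tree,
          visited := PySem.Set.add st.visited root,
          rootpath := st.rootpath.insert root [] }
        [root])
    ⟨[], [], PySem.Dict.empty⟩

def fundamental_cycle_basis_alt (edges : List (Int × Int)) : List (List Int) :=
  let st := pvBfsB edges
  (PySem.List.enumerate edges).foldl
    (fun basis p =>
      if p.1 ∈ st.tree then basis
      else
        let vec0 := PySem.List.pySetD (List.replicate edges.length (0 : Int)) p.1 1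
        let vec := (st.rootpath.getD p.2.1 [] ++ st.rootpath.getD p.2.2 []).foldl pvXor1 vec0
        basis ++ [vec])
    []

-- ===== PRECONDITION & SPEC =====
def Spec_fundamental_cycle_basis (edges : List (Int × Int)) (out : List (List Int)) : Prop := out = fundamental_cycle_basis_alt edges
instance (edges : List (Int × Int)) (out : List (List Int)) : Decidable (Spec_fundamental_cycle_basis edges out) := by unfold Spec_fundamental_cycle_basis; infer_instance

-- ===== CLAIM (what is proved, stated in full; the proofs are below) =====
def Claim_equal_fundamental_cycle_basis : Prop := ∀ (edges : List (Int × Int)), Dom_fundamental_cycle_basis edges → Spec_fundamental_cycle_basis edges (fundamental_cycle_basis edges)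

-- ===== LEMMAS AND PROOFS =====

-- ---- toggle algebra ----
theorem pvBxor1_invol (x : Int) : PySem.Int.bxor (PySem.Int.bxor x 1) 1 = x := by
  unfold PySem.Int.bxor
  by_cases h : 0 ≤ x
  · simp [h]
  · have h2 : ¬ (0 : Int) ≤ -((((-x - 1).toNat ^^^ (1:Int).toNat : Nat)) : Int) - 1 := by omega
    simp only [h, if_false, Int.toNat_one]
    have h3 : (-(-(((-x - 1).toNat ^^^ 1 : Nat) : Int) - 1) - 1).toNat = ((-x - 1).toNat ^^^ 1 : Nat) := by omega
    simp [Nat.xor_xor_cancel_right]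
    omega

theorem pvXor1_natCast (vec : List Int) (n : Nat) :
    pvXor1 vec (n : Int) = vec.set n (PySem.Int.bxor (vec.getD n 0) 1) := by
  simp [pvXor1]

theorem pvXor1_comm (vec : List Int) (i j : Int) (hi : 0 ≤ i) (hj : 0 ≤ j) :
    pvXor1 (pvXor1 vec i) j = pvXor1 (pvXor1 vec j) i := by
  obtain ⟨m, rfl⟩ := Int.eq_ofNat_of_zero_le hi
  obtain ⟨n, rfl⟩ := Int.eq_ofNat_of_zero_le hj
  by_cases h : m = n
  · subst h; rfl
  · simp only [pvXor1_natCast]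
    rw [show ((vec.set m (PySem.Int.bxor (vec.getD m 0) 1)).getD n 0) = vec.getD n 0 by
          simp [List.getD, List.getElem?_set_ne h],
        show ((vec.set n (PySem.Int.bxor (vec.getD n 0) 1)).getD m 0) = vec.getD m 0 by
          simp [List.getD, List.getElem?_set_ne (Ne.symm h)],
        List.set_comm _ _ h]

theorem pvXor1_cancel (vec : List Int) (i : Int) (hi : 0 ≤ i) :
    pvXor1 (pvXor1 vec i) i = vec := by
  obtain ⟨n, rfl⟩ := Int.eq_ofNat_of_zero_le hi
  simp only [pvXor1_natCast]
  by_cases h : n < vec.length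
  · rw [show ((vec.set n (PySem.Int.bxor (vec.getD n 0) 1)).getD n 0) = PySem.Int.bxor (vec.getD n 0) 1 by
          simp [List.getD, h],
        pvBxor1_invol, List.set_set]
    have : vec.getD n 0 = vec[n] := by simp [List.getD, List.getElem?_eq_getElem h]
    rw [this]; exact List.set_getElem_self h
  · rw [List.set_eq_of_length_le (l := vec) (by omega),
        List.set_eq_of_length_le (l := vec) (by omega)]

theorem pvTogList_tog (l : List Int) (hl : ∀ x ∈ l, 0 ≤ x) (e : Int) (he : 0 ≤ e) (w : List Int) :
    l.foldl pvXor1 (pvXor1 w e) = pvXor1 (l.foldl pvXor1 w) e := by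
  induction l generalizing w with
  | nil => rfl
  | cons x t ih =>
    simp only [List.foldl_cons]
    rw [pvXor1_comm w e x he (hl x (by simp))]
    exact ih (fun y hy => hl y (by simp [hy])) (pvXor1 w x)

theorem pvTogList_comm (X Y : List Int) (hX : ∀ x ∈ X, 0 ≤ x) (hY : ∀ x ∈ Y, 0 ≤ x) (w : List Int) :
    Y.foldl pvXor1 (X.foldl pvXor1 w) = X.foldl pvXor1 (Y.foldl pvXor1 w) := by
  induction X generalizing w with
  | nil => rfl
  | cons x t ih =>
    simp only [List.foldl_cons]
    rw [← pvTogList_tog Y hY x (hX x (by simp)) w, ih (fun y hy => hX y (by simp [hy])) (pvXor1 w x)]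

theorem pvTogList_cancel (l : List Int) (hl : ∀ x ∈ l, 0 ≤ x) (w : List Int) :
    l.foldl pvXor1 (l.foldl pvXor1 w) = w := by
  induction l generalizing w with
  | nil => rfl
  | cons e t ih =>
    have ht : ∀ x ∈ t, 0 ≤ x := fun y hy => hl y (by simp [hy])
    have he : 0 ≤ e := hl e (by simp)
    simp only [List.foldl_cons]
    rw [pvTogList_tog t ht e he w, pvXor1_cancel _ e he]
    exact ih ht w

-- ---- spec-side views of A's BFS maps ----
def pvRootF (st : PvStA) : Nat → Int → Int
  | 0, v => v
  | k + 1, v => match st.parent.get? v with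
      | some (some p) => pvRootF st k p
      | _ => v

def pvPathF (st : PvStA) : Nat → Int → List Int
  | 0, _ => []
  | k + 1, v => match st.parentEdge.get? v, st.parent.get? v with
      | some (some e), some (some p) => e :: pvPathF st k p
      | _, _ => []

def pvDepth (st : PvStA) (v : Int) : Int := st.depth.getD v 0
def pvRoot (st : PvStA) (v : Int) : Int := pvRootF st (pvDepth st v).toNat v
def pvPath (st : PvStA) (v : Int) : List Int := pvPathF st (pvDepth st v).toNat v

def PvGood (st : PvStA) (v : Int) : Prop :=
  (st.parent.get? v = some none ∧ st.parentEdge.get? v = some none ∧ st.depth.get? v = some 0)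
  ∨ (∃ p e, st.parent.get? v = some (some p) ∧ st.parentEdge.get? v = some (some e) ∧
      p ∈ st.visited ∧ st.depth.get? v = some (pvDepth st p + 1) ∧ 0 ≤ pvDepth st p ∧ 0 ≤ e)

structure PvInv (adj : PySem.Dict Int (List (Int × Int))) (st : PvStA) (q : List Int) (r : Int) : Prop where
  nodupVis : st.visited.Nodup
  visKeys : ∀ v ∈ st.visited, v ∈ adj.keys
  keysP : st.parent.keys = st.visited
  keysE : st.parentEdge.keys = st.visited
  keysD : st.depth.keys = st.visited
  good : ∀ v ∈ st.visited, PvGood st v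
  depthLt : ∀ v ∈ st.visited, pvDepth st v < (st.visited.length : Int)
  qVis : ∀ v ∈ q, v ∈ st.visited
  qRoot : ∀ v ∈ q, pvRoot st v = r
  closure : ∀ x ∈ st.visited, x ∉ q → ∀ p ∈ adj.getD x [], p.1 ∈ st.visited ∧ pvRoot st p.1 = pvRoot st x

structure PvSim (st : PvStA) (stB : PvStB) : Prop where
  vis : stB.visited = st.visited
  tree : stB.tree = st.tree
  keysR : stB.rootpath.keys = st.visited
  rp : ∀ v ∈ st.visited, stB.rootpath.get? v = some (pvPath st v)

structure PvExt (st st' : PvStA) : Prop where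
  vis : st.visited ⊆ st'.visited
  tree : st.tree ⊆ st'.tree
  maps : ∀ v ∈ st.visited, st'.parent.get? v = st.parent.get? v ∧
    st'.parentEdge.get? v = st.parentEdge.get? v ∧ st'.depth.get? v = st.depth.get? v

def PvAdjOk (adj : PySem.Dict Int (List (Int × Int))) : Prop :=
  ∀ x p, p ∈ adj.getD x [] → (x, p.2) ∈ adj.getD p.1 [] ∧ p.1 ∈ adj.keys ∧ 0 ≤ p.2

-- ---- basic facts ----
theorem pvExt_rfl (st : PvStA) : PvExt st st := ⟨fun _ h => h, fun _ h => h, fun _ _ => ⟨rfl, rfl, rfl⟩⟩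

theorem pvExt_trans {s1 s2 s3 : PvStA} (h12 : PvExt s1 s2) (h23 : PvExt s2 s3) : PvExt s1 s3 := by
  refine ⟨fun v h => h23.vis (h12.vis h), fun v h => h23.tree (h12.tree h), fun v hv => ?_⟩
  obtain ⟨a, b, c⟩ := h12.maps v hv
  obtain ⟨a', b', c'⟩ := h23.maps v (h12.vis hv)
  exact ⟨a'.trans a, b'.trans b, c'.trans c⟩

theorem pvDepth_eq_of_ext {st st' : PvStA} (hx : PvExt st st') {v : Int} (hv : v ∈ st.visited) :
    pvDepth st' v = pvDepth st v := by
  unfold pvDepth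
  rw [PySem.Dict.getD_eq_get?_getD, PySem.Dict.getD_eq_get?_getD, (hx.maps v hv).2.2]

theorem pvDepth_nonneg {st : PvStA} {v : Int} (hg : PvGood st v) : 0 ≤ pvDepth st v := by
  rcases hg with ⟨_, _, h0⟩ | ⟨p, e, _, _, _, hd, hp0, _⟩
  · unfold pvDepth; rw [PySem.Dict.getD_eq_get?_getD, h0]; simp
  · unfold pvDepth; rw [PySem.Dict.getD_eq_get?_getD, hd]; simp; omega

theorem pvGood_ext {st st' : PvStA} (hx : PvExt st st') {v : Int} (hv : v ∈ st.visited)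
    (hg : PvGood st v) : PvGood st' v := by
  obtain ⟨hP, hE, hD⟩ := hx.maps v hv
  rcases hg with ⟨h1, h2, h3⟩ | ⟨p, e, h1, h2, hpv, hd, hp0, he0⟩
  · exact Or.inl ⟨hP.trans h1, hE.trans h2, hD.trans h3⟩
  · refine Or.inr ⟨p, e, hP.trans h1, hE.trans h2, hx.vis hpv, ?_, ?_, he0⟩
    · rw [hD, hd, pvDepth_eq_of_ext hx hpv]
    · rw [pvDepth_eq_of_ext hx hpv]; exact hp0

-- chains only look at visited entries, which Ext preserves
theorem pvRootF_pathF_ext {st st' : PvStA} (hgs : ∀ w ∈ st.visited, PvGood st w)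
    (hx : PvExt st st') : ∀ (k : Nat) (v : Int), v ∈ st.visited →
    pvRootF st' k v = pvRootF st k v ∧ pvPathF st' k v = pvPathF st k v := by
  intro k
  induction k with
  | zero => intro v _; exact ⟨rfl, rfl⟩
  | succ k ih =>
    intro v hv
    obtain ⟨hP, hE, _⟩ := hx.maps v hv
    rcases hgs v hv with ⟨h1, h2, _⟩ | ⟨p, e, h1, h2, hpv, _, _, _⟩
    · constructor
      · simp only [pvRootF]; rw [hP, h1]
      · simp only [pvPathF]; rw [hP, hE, h1, h2]
    · obtain ⟨ihr, ihp⟩ := ih p hpv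
      constructor
      · simp only [pvRootF]; rw [hP, h1]; exact ihr
      · simp only [pvPathF]; rw [hP, hE, h1, h2]
        show e :: pvPathF st' k p = e :: pvPathF st k p
        rw [ihp]

theorem pvRoot_ext {st st' : PvStA} (hgs : ∀ w ∈ st.visited, PvGood st w)
    (hx : PvExt st st') {v : Int} (hv : v ∈ st.visited) : pvRoot st' v = pvRoot st v := by
  unfold pvRoot
  rw [pvDepth_eq_of_ext hx hv]
  exact (pvRootF_pathF_ext hgs hx _ v hv).1

theorem pvPath_ext {st st' : PvStA} (hgs : ∀ w ∈ st.visited, PvGood st w)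
    (hx : PvExt st st') {v : Int} (hv : v ∈ st.visited) : pvPath st' v = pvPath st v := by
  unfold pvPath
  rw [pvDepth_eq_of_ext hx hv]
  exact (pvRootF_pathF_ext hgs hx _ v hv).2

theorem pvRoot_step {st : PvStA} {v p : Int} (hv : PvGood st v)
    (hp : st.parent.get? v = some (some p)) : pvRoot st v = pvRoot st p := by
  rcases hv with ⟨h1, _, _⟩ | ⟨p', e, h1, h2, hpv, hd, hp0, he0⟩
  · rw [h1] at hp; cases hp
  · rw [h1] at hp
    have hpp : p' = p := by injection hp with hp; injection hp
    subst hpp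
    have hdv : pvDepth st v = pvDepth st p' + 1 := by
      unfold pvDepth; rw [PySem.Dict.getD_eq_get?_getD, hd]; rfl
    have ht : (pvDepth st v).toNat = (pvDepth st p').toNat + 1 := by omega
    unfold pvRoot
    rw [ht]
    simp only [pvRootF]
    rw [h1]

theorem pvRoot_of_root {st : PvStA} {v : Int} (h0 : st.depth.get? v = some 0) :
    pvRoot st v = v := by
  have : pvDepth st v = 0 := by
    unfold pvDepth; rw [PySem.Dict.getD_eq_get?_getD, h0]; rfl
  unfold pvRoot
  rw [this]
  rfl

theorem pvPath_unfold {st : PvStA} {v p e : Int} (h1 : st.parent.get? v = some (some p))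
    (h2 : st.parentEdge.get? v = some (some e)) (hd : st.depth.get? v = some (pvDepth st p + 1))
    (hp0 : 0 ≤ pvDepth st p) : pvPath st v = e :: pvPath st p := by
  have hdv : pvDepth st v = pvDepth st p + 1 := by
    unfold pvDepth; rw [PySem.Dict.getD_eq_get?_getD, hd]; rfl
  have ht : (pvDepth st v).toNat = (pvDepth st p).toNat + 1 := by omega
  unfold pvPath
  rw [ht]
  simp only [pvPathF]; rw [h1, h2]

theorem pvDepth_some {st : PvStA} {v : Int} {d : Int} (hd : st.depth.get? v = some d) :
    pvDepth st v = d := by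
  unfold pvDepth; rw [PySem.Dict.getD_eq_get?_getD, hd]; rfl

-- chain decomposition: k steps up from v
theorem pvChain (st : PvStA) (hgs : ∀ w ∈ st.visited, PvGood st w) :
    ∀ (k : Nat) (v : Int), v ∈ st.visited → (k : Int) ≤ pvDepth st v →
    pvRootF st k v ∈ st.visited ∧
    pvDepth st (pvRootF st k v) = pvDepth st v - k ∧
    pvRoot st (pvRootF st k v) = pvRoot st v ∧
    pvPath st v = pvPathF st k v ++ pvPath st (pvRootF st k v) ∧
    (∀ e ∈ pvPathF st k v, 0 ≤ e) := by
  intro k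
  induction k with
  | zero =>
    intro v hv _
    exact ⟨hv, by simp [pvRootF], rfl, rfl, by simp [pvPathF]⟩
  | succ k ih =>
    intro v hv hk
    rcases hgs v hv with ⟨h1, h2, hd⟩ | ⟨p, e, h1, h2, hpv, hd, hp0, he0⟩
    · exfalso
      have : pvDepth st v = 0 := by
        unfold pvDepth; rw [PySem.Dict.getD_eq_get?_getD, hd]; rfl
      rw [this] at hk; push_cast at hk; omega
    · have hdv : pvDepth st v = pvDepth st p + 1 := by
        unfold pvDepth; rw [PySem.Dict.getD_eq_get?_getD, hd]; rfl
      have hkp : (k : Int) ≤ pvDepth st p := by push_cast at hk ⊢; omega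
      obtain ⟨m1, m2, m3, m4, m5⟩ := ih p hpv hkp
      have hstep : pvRootF st (k+1) v = pvRootF st k p := by
        simp only [pvRootF]; rw [h1]
      have hpstep : pvPathF st (k+1) v = e :: pvPathF st k p := by
        simp only [pvPathF]; rw [h1, h2]
      have hpathv : pvPath st v = e :: pvPath st p := by
        unfold pvPath
        have ht : (pvDepth st v).toNat = (pvDepth st p).toNat + 1 := by omega
        rw [ht]
        simp only [pvPathF]; rw [h1, h2]
      refine ⟨by rw [hstep]; exact m1, ?_, ?_, ?_, ?_⟩
      · rw [hstep, m2, hdv]; push_cast; ring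
      · rw [hstep, m3]
        exact (pvRoot_step (hgs v hv) h1).symm
      · rw [hstep, hpstep, hpathv, m4]; simp
      · intro x hx
        rw [hpstep] at hx
        rcases List.mem_cons.mp hx with rfl | hx
        · exact he0
        · exact m5 x hx

theorem pvPath_nonneg {st : PvStA} (hgs : ∀ w ∈ st.visited, PvGood st w) {v : Int}
    (hv : v ∈ st.visited) : ∀ e ∈ pvPath st v, 0 ≤ e := by
  have h0 : 0 ≤ pvDepth st v := pvDepth_nonneg (hgs v hv)
  have := (pvChain st hgs (pvDepth st v).toNat v hv (by omega)).2.2.2.2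
  unfold pvPath
  exact this

-- ---- climb loop lemmas ----
theorem pvClimbUp_spec (st : PvStA) (hgs : ∀ w ∈ st.visited, PvGood st w)
    (b : Int) (hb : b ∈ st.visited) :
    ∀ (f : Nat) (a : Int) (vec : List Int), a ∈ st.visited →
    (pvDepth st a - pvDepth st b).toNat ≤ f →
    pvClimbUp st.parentEdge st.parent st.depth f a b vec =
      (pvRootF st (pvDepth st a - pvDepth st b).toNat a,
       (pvPathF st (pvDepth st a - pvDepth st b).toNat a).foldl pvXor1 vec) := by
  intro f
  induction f with
  | zero =>
    intro a vec _ hk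
    have hk0 : (pvDepth st a - pvDepth st b).toNat = 0 := by omega
    rw [hk0]
    rfl
  | succ f ih =>
    intro a vec ha hk
    simp only [pvClimbUp]
    by_cases hgt : st.depth.getD b 0 < st.depth.getD a 0
    · rw [if_pos hgt]
      have hgt' : pvDepth st b < pvDepth st a := hgt
      rcases hgs a ha with ⟨h1, h2, hd⟩ | ⟨p, e, h1, h2, hpv, hd, hp0, he0⟩
      · exfalso
        have hb0 : 0 ≤ pvDepth st b := pvDepth_nonneg (hgs b hb)
        have := pvDepth_some hd
        omega
      · rw [PySem.Dict.getD_eq_get?_getD, PySem.Dict.getD_eq_get?_getD, h1, h2]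
        simp only [Option.getD_some]
        have hdv : pvDepth st a = pvDepth st p + 1 := pvDepth_some hd
        have hk1 : (pvDepth st a - pvDepth st b).toNat =
            (pvDepth st p - pvDepth st b).toNat + 1 := by omega
        rw [ih p (pvXor1 vec e) hpv (by omega), hk1]
        have hr : pvRootF st ((pvDepth st p - pvDepth st b).toNat + 1) a =
            pvRootF st (pvDepth st p - pvDepth st b).toNat p := by
          simp only [pvRootF]; rw [h1]
        have hq : pvPathF st ((pvDepth st p - pvDepth st b).toNat + 1) a =
            e :: pvPathF st (pvDepth st p - pvDepth st b).toNat p := by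
          simp only [pvPathF]; rw [h1, h2]
        rw [hr, hq, List.foldl_cons]
    · rw [if_neg hgt]
      have hk0 : (pvDepth st a - pvDepth st b).toNat = 0 := by
        have : ¬ pvDepth st b < pvDepth st a := hgt
        omega
      rw [hk0]
      rfl

theorem pvClimbBoth_spec (st : PvStA) (hgs : ∀ w ∈ st.visited, PvGood st w) :
    ∀ (f : Nat) (a b : Int) (vec : List Int), a ∈ st.visited → b ∈ st.visited →
    pvDepth st a = pvDepth st b → pvRoot st a = pvRoot st b →
    (pvDepth st a).toNat < f →
    pvClimbBoth st.parentEdge st.parent f a b vec =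
      (pvPath st a ++ pvPath st b).foldl pvXor1 vec := by
  intro f
  induction f with
  | zero => intro a b vec _ _ _ _ h; omega
  | succ f ih =>
    intro a b vec ha hb hdep hroot hf
    simp only [pvClimbBoth]
    by_cases hab : a = b
    · subst hab
      rw [if_pos rfl, List.foldl_append]
      exact (pvTogList_cancel (pvPath st a) (pvPath_nonneg hgs ha) vec).symm
    · rw [if_neg hab]
      rcases hgs a ha with ⟨ha1, ha2, had⟩ | ⟨p1, e1, ha1, ha2, hp1v, had, hp10, he10⟩
      · exfalso
        rcases hgs b hb with ⟨hb1, hb2, hbd⟩ | ⟨p2, e2, hb1, hb2, hp2v, hbd, hp20, he20⟩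
        · exact hab ((pvRoot_of_root had).symm.trans (hroot.trans (pvRoot_of_root hbd)))
        · have := pvDepth_some had
          have := pvDepth_some hbd
          omega
      · rcases hgs b hb with ⟨hb1, hb2, hbd⟩ | ⟨p2, e2, hb1, hb2, hp2v, hbd, hp20, he20⟩
        · exfalso
          have := pvDepth_some had
          have := pvDepth_some hbd
          omega
        · rw [PySem.Dict.getD_eq_get?_getD (d := st.parentEdge), ha2,
              PySem.Dict.getD_eq_get?_getD (d := st.parent), ha1,
              PySem.Dict.getD_eq_get?_getD (d := st.parentEdge), hb2,
              PySem.Dict.getD_eq_get?_getD (d := st.parent), hb1]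
          simp only [Option.getD_some]
          have hda : pvDepth st a = pvDepth st p1 + 1 := pvDepth_some had
          have hdb : pvDepth st b = pvDepth st p2 + 1 := pvDepth_some hbd
          rw [ih p1 p2 (pvXor1 (pvXor1 vec e1) e2) hp1v hp2v (by omega)
              (by rw [← pvRoot_step (hgs a ha) ha1, ← pvRoot_step (hgs b hb) hb1]; exact hroot)
              (by omega)]
          rw [pvPath_unfold ha1 ha2 had hp10, pvPath_unfold hb1 hb2 hbd hp20]
          have hP1 := pvPath_nonneg hgs hp1v
          have hP2 := pvPath_nonneg hgs hp2v
          have hswap : ∀ (X Y : List Int), (∀ x ∈ X, 0 ≤ x) → (∀ x ∈ Y, 0 ≤ x) →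
              ∀ w, (X ++ Y).foldl pvXor1 w = (Y ++ X).foldl pvXor1 w := by
            intro X Y hX hY w
            rw [List.foldl_append, List.foldl_append, pvTogList_comm X Y hX hY]
          have hcons : ∀ x ∈ pvPath st p1 ++ e2 :: pvPath st p2, 0 ≤ x := by
            intro x hx
            rcases List.mem_append.mp hx with h | h
            · exact hP1 x h
            · rcases List.mem_cons.mp h with rfl | h
              · exact he20
              · exact hP2 x h
          refine Eq.symm ?_
          calc ((e1 :: pvPath st p1) ++ e2 :: pvPath st p2).foldl pvXor1 vec
              = (pvPath st p1 ++ e2 :: pvPath st p2).foldl pvXor1 (pvXor1 vec e1) := by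
                simp [List.foldl_cons]
            _ = ((e2 :: pvPath st p2) ++ pvPath st p1).foldl pvXor1 (pvXor1 vec e1) := by
                rw [hswap _ _ hP1 (fun x hx => by
                  rcases List.mem_cons.mp hx with rfl | h
                  · exact he20
                  · exact hP2 x h)]
            _ = (pvPath st p2 ++ pvPath st p1).foldl pvXor1 (pvXor1 (pvXor1 vec e1) e2) := by
                simp [List.foldl_cons]
            _ = (pvPath st p1 ++ pvPath st p2).foldl pvXor1 (pvXor1 (pvXor1 vec e1) e2) := by
                rw [hswap _ _ hP2 hP1]

-- ---- adjacency characterization ----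
def pvPairsOf (edges : List (Int × Int)) : List (Int × (Int × Int)) :=
  (PySem.List.enumerate edges).flatMap (fun p => [(p.2.1, (p.2.2, p.1)), (p.2.2, (p.2.1, p.1))])

theorem pvAdjRaw_eq (edges : List (Int × Int)) :
    pvAdjRaw edges = (pvPairsOf edges).foldl (fun d q => d.modify q.1 [] (· ++ [q.2])) PySem.Dict.empty := by
  unfold pvAdjRaw pvPairsOf
  generalize (PySem.List.enumerate edges) = l
  suffices h : ∀ (d : PySem.Dict Int (List (Int × Int))),
      l.foldl (fun d p => (d.modify p.2.1 [] (· ++ [(p.2.2, p.1)])).modify p.2.2 [] (· ++ [(p.2.1, p.1)])) d =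
      (l.flatMap (fun p => [(p.2.1, (p.2.2, p.1)), (p.2.2, (p.2.1, p.1))])).foldl
        (fun d q => d.modify q.1 [] (· ++ [q.2])) d from h _
  induction l with
  | nil => intro d; rfl
  | cons p t ih => intro d; simp only [List.foldl_cons, List.flatMap_cons, List.foldl_append]; exact ih _

theorem pvAdjRaw_getD (edges : List (Int × Int)) (c : Int) :
    (pvAdjRaw edges).getD c [] = ((pvPairsOf edges).filter (·.1 == c)).map (·.2) := by
  rw [pvAdjRaw_eq, PySem.Dict.getD_foldl_modify_append]
  simp

theorem pvAdjRaw_keys (edges : List (Int × Int)) :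
    (pvAdjRaw edges).keys = PySem.Set.ofList ((pvPairsOf edges).map (·.1)) := by
  rw [pvAdjRaw_eq]
  rw [PySem.Dict.keys_foldl_modify_key]
  simp [PySem.Set.update_nil_left]

theorem pvAdjRaw_keys_nodup (edges : List (Int × Int)) : (pvAdjRaw edges).keys.Nodup := by
  rw [pvAdjRaw_keys]; exact PySem.Set.nodup_ofList _

theorem pvAdj_items (edges : List (Int × Int)) :
    (pvAdj edges).items = (pvAdjRaw edges).items.map
      (fun p => (p.1, PySem.List.sorted2 p.2 Prod.fst Prod.snd)) := by
  unfold pvAdj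
  rw [PySem.Dict.items_foldl_insert_fresh (pvAdjRaw edges).items (·.1)
    (fun p => PySem.List.sorted2 p.2 Prod.fst Prod.snd) PySem.Dict.empty
    (fun a _ => PySem.Dict.contains_empty _) (pvAdjRaw_keys_nodup edges)]
  rfl

theorem pvAdj_keys (edges : List (Int × Int)) : (pvAdj edges).keys = (pvAdjRaw edges).keys := by
  show (pvAdj edges).items.map (·.1) = (pvAdjRaw edges).items.map (·.1)
  rw [pvAdj_items, List.map_map]
  rfl

theorem pvAdj_keys_nodup (edges : List (Int × Int)) : (pvAdj edges).keys.Nodup := by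
  rw [pvAdj_keys]; exact pvAdjRaw_keys_nodup edges

theorem pvAdj_getD (edges : List (Int × Int)) (c : Int) :
    (pvAdj edges).getD c [] =
      PySem.List.sorted2 ((pvAdjRaw edges).getD c []) Prod.fst Prod.snd := by
  by_cases hc : c ∈ (pvAdjRaw edges).keys
  · have hcont : (pvAdjRaw edges).contains c = true := (PySem.Dict.contains_iff_mem_keys _ _).mpr hc
    have hg : (pvAdjRaw edges).get? c = some ((pvAdjRaw edges).getD c []) := by
      rw [PySem.Dict.getD_eq_get?_getD]
      cases hgg : (pvAdjRaw edges).get? c with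
      | none => rw [PySem.Dict.get?_eq_none_iff_contains] at hgg; rw [hgg] at hcont; cases hcont
      | some vs => rfl
    have hmem : (c, (pvAdjRaw edges).getD c []) ∈ (pvAdjRaw edges).items :=
      PySem.Dict.mem_items_of_get?_eq_some _ hg
    have hmem2 : (c, PySem.List.sorted2 ((pvAdjRaw edges).getD c []) Prod.fst Prod.snd) ∈ (pvAdj edges).items := by
      rw [pvAdj_items]
      exact List.mem_map.mpr ⟨_, hmem, rfl⟩
    exact PySem.Dict.getD_of_mem_items _ hmem2 (pvAdj_keys_nodup edges) []
  · have h1 : (pvAdj edges).contains c = false := by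
      rw [← Bool.not_eq_true, PySem.Dict.contains_iff_mem_keys, pvAdj_keys]; exact hc
    have h2 : (pvAdjRaw edges).contains c = false := by
      rw [← Bool.not_eq_true, PySem.Dict.contains_iff_mem_keys]; exact hc
    rw [PySem.Dict.getD_of_not_contains _ [] h1, PySem.Dict.getD_of_not_contains _ [] h2]
    rfl

theorem pvAdj_mem_iff (edges : List (Int × Int)) (c : Int) (q : Int × Int) :
    q ∈ (pvAdj edges).getD c [] ↔ (c, q) ∈ pvPairsOf edges := by
  rw [pvAdj_getD, (PySem.List.sorted2_perm _ _ _ _).mem_iff, pvAdjRaw_getD]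
  simp only [List.mem_map, List.mem_filter, beq_iff_eq]
  constructor
  · rintro ⟨r, ⟨hr, hr1⟩, rfl⟩
    obtain ⟨r1, r2⟩ := r
    simp only at hr1
    rw [← hr1]
    exact hr
  · intro h
    exact ⟨(c, q), ⟨h, rfl⟩, rfl⟩

theorem pvMem_pairsOf (edges : List (Int × Int)) (c : Int) (q : Int × Int) :
    (c, q) ∈ pvPairsOf edges ↔ ∃ (j : Nat) (h : j < edges.length), q.2 = (j : Int) ∧
      (edges[j] = (c, q.1) ∨ edges[j] = (q.1, c)) := by
  unfold pvPairsOf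
  rw [List.mem_flatMap]
  constructor
  · rintro ⟨p, hp, hmem⟩
    obtain ⟨k, hk, rfl⟩ := (PySem.List.mem_enumerate_iff _ _ _).mp hp
    simp only [List.mem_cons, List.not_mem_nil, or_false] at hmem
    rcases hmem with h | h
    all_goals
      rw [Prod.ext_iff] at h
      obtain ⟨hc, hq⟩ := h
      rw [Prod.ext_iff] at hq
      obtain ⟨hq1, hq2⟩ := hq
      simp only at hc hq1 hq2
      refine ⟨k, hk, by simpa using hq2, ?_⟩
    all_goals simp [hc, hq1, Prod.ext_iff]
  · rintro ⟨j, hj, hq2, hor⟩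
    refine ⟨((j : Int), edges[j]), (PySem.List.mem_enumerate_iff _ _ _).mpr ⟨j, hj, by simp⟩, ?_⟩
    obtain ⟨q1, q2⟩ := q
    simp only at hq2
    subst hq2
    rcases hor with h | h
    · simp [h]
    · simp [h]

theorem pvKeys_char (edges : List (Int × Int)) (c : Int) :
    c ∈ (pvAdj edges).keys ↔ c ∈ (pvPairsOf edges).map (·.1) := by
  rw [pvAdj_keys, pvAdjRaw_keys, PySem.Set.mem_ofList]

theorem pvAdjOk_pvAdj (edges : List (Int × Int)) : PvAdjOk (pvAdj edges) := by
  intro x p hp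
  rw [pvAdj_mem_iff, pvMem_pairsOf] at hp
  obtain ⟨j, hj, hq2, hor⟩ := hp
  refine ⟨?_, ?_, by rw [hq2]; exact Int.natCast_nonneg j⟩
  · rw [pvAdj_mem_iff, pvMem_pairsOf]
    refine ⟨j, hj, hq2, ?_⟩
    rcases hor with h | h
    · right; rw [h]
    · left; rw [h]
  · rw [pvKeys_char]
    refine List.mem_map.mpr ⟨(p.1, (x, p.2)), ?_, rfl⟩
    rw [pvMem_pairsOf]
    refine ⟨j, hj, hq2, ?_⟩
    rcases hor with h | h
    · right; rw [h]
    · left; rw [h]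

theorem pvPairsOf_length (edges : List (Int × Int)) :
    (pvPairsOf edges).length = 2 * edges.length := by
  unfold pvPairsOf
  rw [List.length_flatMap]
  simp
  omega

theorem pvAdj_size_le (edges : List (Int × Int)) :
    (pvAdj edges).keys.length ≤ 2 * edges.length := by
  rw [pvAdj_keys, pvAdjRaw_keys]
  calc (PySem.Set.ofList ((pvPairsOf edges).map (·.1))).length
      ≤ ((pvPairsOf edges).map (·.1)).length := PySem.Set.length_ofList_le _
    _ = (pvPairsOf edges).length := List.length_map _
    _ = 2 * edges.length := pvPairsOf_length edges

theorem pvAdj_endpoint_mem (edges : List (Int × Int)) (j : Nat) (h : j < edges.length) :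
    (edges[j].2, (j : Int)) ∈ (pvAdj edges).getD edges[j].1 [] := by
  rw [pvAdj_mem_iff, pvMem_pairsOf]
  exact ⟨j, h, rfl, Or.inl Prod.mk.eta.symm⟩

-- ---- BFS simulation and invariant ----

theorem pvUK_dec (keys vis : List Int) (v : Int) (hk : v ∈ keys) (hnd : keys.Nodup) (hv : v ∉ vis) :
    (keys.filter (fun k => !decide (k ∈ vis ++ [v]))).length + 1 =
    (keys.filter (fun k => !decide (k ∈ vis))).length := by
  induction keys with
  | nil => cases hk
  | cons k t ih =>
    rcases List.mem_cons.mp hk with rfl | hk'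
    · have hvt : v ∉ t := (List.nodup_cons.mp hnd).1
      have hfeq : t.filter (fun k => !decide (k ∈ vis ++ [v])) = t.filter (fun k => !decide (k ∈ vis)) := by
        apply List.filter_congr
        intro x hx
        have : x ≠ v := fun h => hvt (h ▸ hx)
        simp [List.mem_append, this]
      have h1 : (!decide (v ∈ vis ++ [v])) = false := by simp
      have h2 : (!decide (v ∈ vis)) = true := by simp [hv]
      simp only [List.filter_cons, h1, h2, hfeq, if_true]
      simp
    · have hnd' : t.Nodup := (List.nodup_cons.mp hnd).2
      simp only [List.filter_cons]
      by_cases hkv : k ∈ vis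
      · have h1 : (!decide (k ∈ vis ++ [v])) = false := by simp [List.mem_append, hkv]
        have h2 : (!decide (k ∈ vis)) = false := by simp [hkv]
        simp only [h1, h2]
        exact ih hk' hnd'
      · have hknev : k ≠ v := fun h => (List.nodup_cons.mp hnd).1 (h ▸ hk')
        have h1 : (!decide (k ∈ vis ++ [v])) = true := by simp [List.mem_append, hkv, hknev]
        have h2 : (!decide (k ∈ vis)) = true := by simp [hkv]
        simp only [h1, h2, if_true, List.length_cons]
        have := ih hk' hnd'
        omega

theorem pvVisit_step (adj : PySem.Dict Int (List (Int × Int))) (hadj : PvAdjOk adj)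
    (hnd : adj.keys.Nodup)
    (u r : Int) (p : Int × Int) (hp : p ∈ adj.getD u [])
    (st : PvStA) (q : List Int) (stB : PvStB)
    (hinv : PvInv adj st (u :: q) r) (hsim : PvSim st stB) :
    PvInv adj (pvVisitA u (st, q) p).1 (u :: (pvVisitA u (st, q) p).2) r ∧
    PvSim (pvVisitA u (st, q) p).1 (pvVisitB u (stB, q) p).1 ∧
    (pvVisitB u (stB, q) p).2 = (pvVisitA u (st, q) p).2 ∧
    PvExt st (pvVisitA u (st, q) p).1 ∧
    p.1 ∈ (pvVisitA u (st, q) p).1.visited ∧ pvRoot (pvVisitA u (st, q) p).1 p.1 = r ∧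
    (pvVisitA u (st, q) p).2.length +
      (adj.keys.filter (fun k => !decide (k ∈ (pvVisitA u (st, q) p).1.visited))).length ≤
      q.length + (adj.keys.filter (fun k => !decide (k ∈ st.visited))).length := by
  have hu_vis : u ∈ st.visited := hinv.qVis u (by simp)
  have hrootu : pvRoot st u = r := hinv.qRoot u (by simp)
  by_cases hv : p.1 ∈ st.visited
  · have hA : pvVisitA u (st, q) p = (st, q) := by simp [pvVisitA, hv]
    have hB : pvVisitB u (stB, q) p = (stB, q) := by simp [pvVisitB, hsim.vis, hv]
    rw [hA, hB]
    refine ⟨hinv, hsim, rfl, pvExt_rfl st, hv, ?_, le_refl _⟩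
    by_cases hq : p.1 ∈ u :: q
    · exact hinv.qRoot p.1 hq
    · have hsymm := (hadj u p hp).1
      have := (hinv.closure p.1 hv hq (u, p.2) hsymm).2
      simp only at this
      show pvRoot st p.1 = r
      rw [← this, hrootu]
  · -- fresh neighbor
    have hA : pvVisitA u (st, q) p =
        ({ parent := st.parent.insert p.1 (some u),
           parentEdge := st.parentEdge.insert p.1 (some p.2),
           depth := st.depth.insert p.1 (st.depth.getD u 0 + 1),
           tree := PySem.Set.add st.tree p.2,
           visited := PySem.Set.add st.visited p.1 }, q ++ [p.1]) := by
      simp [pvVisitA, hv]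
    have hB : pvVisitB u (stB, q) p =
        ({ tree := PySem.Set.add stB.tree p.2,
           visited := PySem.Set.add stB.visited p.1,
           rootpath := stB.rootpath.insert p.1 (p.2 :: stB.rootpath.getD u []) }, q ++ [p.1]) := by
      simp [pvVisitB, hsim.vis, hv]
    rw [hA, hB]
    simp only
    set stA' : PvStA :=
      { parent := st.parent.insert p.1 (some u),
        parentEdge := st.parentEdge.insert p.1 (some p.2),
        depth := st.depth.insert p.1 (st.depth.getD u 0 + 1),
        tree := PySem.Set.add st.tree p.2,
        visited := PySem.Set.add st.visited p.1 } with hstA'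
    have hvisadd : stA'.visited = st.visited ++ [p.1] := PySem.Set.add_of_not_mem hv
    have hvislen : stA'.visited.length = st.visited.length + 1 := by
      rw [hvisadd, List.length_append, List.length_singleton]
    have hne : ∀ w ∈ st.visited, w ≠ p.1 := fun w hw h => hv (h ▸ hw)
    have hmemA' : ∀ w ∈ st.visited, w ∈ stA'.visited := by
      intro w hw; rw [hvisadd]; exact List.mem_append.mpr (Or.inl hw)
    have hvA' : p.1 ∈ stA'.visited := by rw [hvisadd]; simp
    have hExt : PvExt st stA' := by
      refine ⟨hmemA', fun y hy => (PySem.Set.mem_add _ _ _).mpr (Or.inl hy), fun w hw => ?_⟩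
      exact ⟨PySem.Dict.get?_insert_of_ne _ _ (hne w hw), PySem.Dict.get?_insert_of_ne _ _ (hne w hw),
        PySem.Dict.get?_insert_of_ne _ _ (hne w hw)⟩
    have hGoodu := hinv.good u hu_vis
    have hdu' : pvDepth stA' u = pvDepth st u := pvDepth_eq_of_ext hExt hu_vis
    have hdP : stA'.depth.get? p.1 = some (pvDepth stA' u + 1) := by
      show (st.depth.insert p.1 (st.depth.getD u 0 + 1)).get? p.1 = _
      rw [PySem.Dict.get?_insert_self, hdu']
      rfl
    have hPP : stA'.parent.get? p.1 = some (some u) := PySem.Dict.get?_insert_self _ _ _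
    have hEP : stA'.parentEdge.get? p.1 = some (some p.2) := PySem.Dict.get?_insert_self _ _ _
    have hGoodv : PvGood stA' p.1 := by
      refine Or.inr ⟨u, p.2, hPP, hEP, hmemA' u hu_vis, hdP, ?_, (hadj u p hp).2.2⟩
      rw [hdu']
      exact pvDepth_nonneg hGoodu
    have hgood' : ∀ w ∈ stA'.visited, PvGood stA' w := by
      intro w hw
      rw [hvisadd] at hw
      rcases List.mem_append.mp hw with hw | hw
      · exact pvGood_ext hExt hw (hinv.good w hw)
      · rw [List.mem_singleton.mp hw]
        exact hGoodv
    have hroot_pres : ∀ w ∈ st.visited, pvRoot stA' w = pvRoot st w :=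
      fun w hw => pvRoot_ext hinv.good hExt hw
    have hrootv : pvRoot stA' p.1 = r := by
      rw [pvRoot_step hGoodv hPP, hroot_pres u hu_vis, hrootu]
    have hcontP : st.parent.contains p.1 = false := by
      rw [← Bool.not_eq_true, PySem.Dict.contains_iff_mem_keys, hinv.keysP]; exact hv
    have hcontE : st.parentEdge.contains p.1 = false := by
      rw [← Bool.not_eq_true, PySem.Dict.contains_iff_mem_keys, hinv.keysE]; exact hv
    have hcontD : st.depth.contains p.1 = false := by
      rw [← Bool.not_eq_true, PySem.Dict.contains_iff_mem_keys, hinv.keysD]; exact hv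
    have hdepv : pvDepth stA' p.1 = pvDepth st u + 1 := by
      rw [pvDepth_some hdP, hdu']
    refine ⟨?_, ?_, trivial, hExt, hvA', hrootv, ?_⟩
    · -- the invariant for stA'
      refine ⟨?_, ?_, ?_, ?_, ?_, hgood', ?_, ?_, ?_, ?_⟩
      · rw [hvisadd]
        rw [← PySem.Set.add_of_not_mem hv]
        exact PySem.Set.nodup_add _ _ hinv.nodupVis
      · intro w hw
        rw [hvisadd] at hw
        rcases List.mem_append.mp hw with hw | hw
        · exact hinv.visKeys w hw
        · rw [List.mem_singleton.mp hw]
          exact (hadj u p hp).2.1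
      · show (st.parent.insert p.1 (some u)).keys = stA'.visited
        rw [PySem.Dict.keys_insert_of_not_contains _ _ hcontP, hinv.keysP, hvisadd]
      · show (st.parentEdge.insert p.1 (some p.2)).keys = stA'.visited
        rw [PySem.Dict.keys_insert_of_not_contains _ _ hcontE, hinv.keysE, hvisadd]
      · show (st.depth.insert p.1 (st.depth.getD u 0 + 1)).keys = stA'.visited
        rw [PySem.Dict.keys_insert_of_not_contains _ _ hcontD, hinv.keysD, hvisadd]
      · -- depthLt
        intro w hw
        rw [hvislen] at *
        rw [hvisadd] at hw
        rcases List.mem_append.mp hw with hw | hw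
        · rw [pvDepth_eq_of_ext hExt hw]
          have := hinv.depthLt w hw
          push_cast
          omega
        · rw [List.mem_singleton.mp hw, hdepv]
          have := hinv.depthLt u hu_vis
          push_cast
          omega
      · -- qVis
        intro w hw
        rcases List.mem_cons.mp hw with rfl | hw
        · exact hmemA' _ hu_vis
        · rcases List.mem_append.mp hw with hw | hw
          · exact hmemA' _ (hinv.qVis w (List.mem_cons.mpr (Or.inr hw)))
          · rw [List.mem_singleton.mp hw]
            exact hvA'
      · -- qRoot
        intro w hw
        rcases List.mem_cons.mp hw with rfl | hw
        · rw [hroot_pres _ hu_vis]; exact hrootu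
        · rcases List.mem_append.mp hw with hw | hw
          · have hwv := hinv.qVis w (List.mem_cons.mpr (Or.inr hw))
            rw [hroot_pres _ hwv]
            exact hinv.qRoot w (List.mem_cons.mpr (Or.inr hw))
          · rw [List.mem_singleton.mp hw]
            exact hrootv
      · -- closure
        intro x hx hxq pp hpp
        have hxold : x ∈ st.visited := by
          rw [hvisadd] at hx
          rcases List.mem_append.mp hx with hx | hx
          · exact hx
          · exfalso
            exact hxq (by rw [List.mem_singleton.mp hx]; simp)
        have hxq' : x ∉ u :: q := by
          intro hmem
          apply hxq
          rcases List.mem_cons.mp hmem with rfl | hmem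
          · simp
          · exact List.mem_cons.mpr (Or.inr (List.mem_append.mpr (Or.inl hmem)))
        obtain ⟨hv1, hr1⟩ := hinv.closure x hxold hxq' pp hpp
        exact ⟨hmemA' _ hv1, by rw [hroot_pres _ hv1, hroot_pres _ hxold, hr1]⟩
    · -- simulation
      refine ⟨?_, ?_, ?_, ?_⟩
      · show PySem.Set.add stB.visited p.1 = stA'.visited
        rw [hsim.vis]
      · show PySem.Set.add stB.tree p.2 = stA'.tree
        rw [hsim.tree]
      · show (stB.rootpath.insert p.1 (p.2 :: stB.rootpath.getD u [])).keys = stA'.visited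
        have hcontR : stB.rootpath.contains p.1 = false := by
          rw [← Bool.not_eq_true, PySem.Dict.contains_iff_mem_keys, hsim.keysR]; exact hv
        rw [PySem.Dict.keys_insert_of_not_contains _ _ hcontR, hsim.keysR, hvisadd]
      · intro w hw
        rw [hvisadd] at hw
        rcases List.mem_append.mp hw with hw | hw
        · show (stB.rootpath.insert p.1 (p.2 :: stB.rootpath.getD u [])).get? w = _
          rw [PySem.Dict.get?_insert_of_ne _ _ (hne w hw), hsim.rp w hw,
            pvPath_ext hinv.good hExt hw]
        · rw [List.mem_singleton.mp hw]
          show (stB.rootpath.insert p.1 (p.2 :: stB.rootpath.getD u [])).get? p.1 = _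
          rw [PySem.Dict.get?_insert_self]
          have hrpu : stB.rootpath.getD u [] = pvPath st u := by
            rw [PySem.Dict.getD_eq_get?_getD, hsim.rp u hu_vis]
            rfl
          have hpath : pvPath stA' p.1 = p.2 :: pvPath stA' u := by
            refine pvPath_unfold hPP hEP hdP ?_
            rw [hdu']
            exact pvDepth_nonneg hGoodu
          rw [hpath, pvPath_ext hinv.good hExt hu_vis, hrpu]
    · -- accounting
      have hUK := pvUK_dec adj.keys st.visited p.1 (hadj u p hp).2.1 hnd hv
      have hfe : (adj.keys.filter (fun k => !decide (k ∈ PySem.Set.add st.visited p.1))) =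
          (adj.keys.filter (fun k => !decide (k ∈ st.visited ++ [p.1]))) := by
        apply List.filter_congr
        intro x _
        simp [PySem.Set.add_of_not_mem hv]
      simp only [hfe, List.length_append, List.length_singleton]
      omega

theorem pvVisit_fold (adj : PySem.Dict Int (List (Int × Int))) (hadj : PvAdjOk adj)
    (hnd : adj.keys.Nodup) (u r : Int) :
    ∀ (nbrs : List (Int × Int)), (∀ p ∈ nbrs, p ∈ adj.getD u []) →
    ∀ (st : PvStA) (rest : List Int) (stB : PvStB),
    PvInv adj st (u :: rest) r → PvSim st stB →
    PvInv adj (nbrs.foldl (pvVisitA u) (st, rest)).1 (u :: (nbrs.foldl (pvVisitA u) (st, rest)).2) r ∧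
    PvSim (nbrs.foldl (pvVisitA u) (st, rest)).1 (nbrs.foldl (pvVisitB u) (stB, rest)).1 ∧
    (nbrs.foldl (pvVisitB u) (stB, rest)).2 = (nbrs.foldl (pvVisitA u) (st, rest)).2 ∧
    PvExt st (nbrs.foldl (pvVisitA u) (st, rest)).1 ∧
    (∀ p ∈ nbrs, p.1 ∈ (nbrs.foldl (pvVisitA u) (st, rest)).1.visited ∧
      pvRoot (nbrs.foldl (pvVisitA u) (st, rest)).1 p.1 = r) ∧
    (nbrs.foldl (pvVisitA u) (st, rest)).2.length +
      (adj.keys.filter (fun k => !decide (k ∈ (nbrs.foldl (pvVisitA u) (st, rest)).1.visited))).length ≤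
      rest.length + (adj.keys.filter (fun k => !decide (k ∈ st.visited))).length := by
  intro nbrs
  induction nbrs with
  | nil =>
    intro _ st rest stB hinv hsim
    exact ⟨hinv, hsim, rfl, pvExt_rfl st, by simp, le_refl _⟩
  | cons p t ih =>
    intro hmem st rest stB hinv hsim
    obtain ⟨inv1, sim1, qeq1, ext1, pmem1, proot1, acc1⟩ :=
      pvVisit_step adj hadj hnd u r p (hmem p (by simp)) st rest stB hinv hsim
    have hBstep : pvVisitB u (stB, rest) p =
        ((pvVisitB u (stB, rest) p).1, (pvVisitA u (st, rest) p).2) := by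
      rw [← qeq1]
    obtain ⟨inv2, sim2, qeq2, ext2, pprop2, acc2⟩ :=
      ih (fun x hx => hmem x (by simp [hx]))
        (pvVisitA u (st, rest) p).1 (pvVisitA u (st, rest) p).2
        (pvVisitB u (stB, rest) p).1 inv1 sim1
    rw [List.foldl_cons, List.foldl_cons, hBstep]
    refine ⟨inv2, sim2, qeq2, pvExt_trans ext1 ext2, ?_, le_trans acc2 acc1⟩
    intro x hx
    rcases List.mem_cons.mp hx with rfl | hx
    · exact ⟨ext2.vis pmem1, by rw [pvRoot_ext inv1.good ext2 pmem1]; exact proot1⟩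
    · exact pprop2 x hx

theorem pvRun_spec (adj : PySem.Dict Int (List (Int × Int))) (hadj : PvAdjOk adj)
    (hnd : adj.keys.Nodup) (r : Int) :
    ∀ (f : Nat) (st : PvStA) (q : List Int) (stB : PvStB),
    PvInv adj st q r → PvSim st stB →
    q.length + (adj.keys.filter (fun k => !decide (k ∈ st.visited))).length < f →
    PvInv adj (pvRunA adj f st q) [] r ∧ PvSim (pvRunA adj f st q) (pvRunB adj f stB q) ∧
    PvExt st (pvRunA adj f st q) := by
  intro f
  induction f with
  | zero => intro st q stB _ _ h; omega
  | succ f ih =>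
    intro st q stB hinv hsim hcount
    match q with
    | [] => exact ⟨hinv, hsim, pvExt_rfl st⟩
    | u :: rest =>
      obtain ⟨inv1, sim1, qeq1, ext1, pprop1, acc1⟩ :=
        pvVisit_fold adj hadj hnd u r (adj.getD u []) (fun _ hp => hp) st rest stB hinv hsim
      set s := (adj.getD u []).foldl (pvVisitA u) (st, rest) with hs
      set sB := (adj.getD u []).foldl (pvVisitB u) (stB, rest) with hsB
      have hrootu : pvRoot s.1 u = r := by
        have hu_vis : u ∈ st.visited := hinv.qVis u (by simp)
        rw [pvRoot_ext hinv.good ext1 hu_vis]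
        exact hinv.qRoot u (by simp)
      have dropU : PvInv adj s.1 s.2 r := by
        refine ⟨inv1.nodupVis, inv1.visKeys, inv1.keysP, inv1.keysE, inv1.keysD, inv1.good,
          inv1.depthLt, ?_, ?_, ?_⟩
        · exact fun v hv => inv1.qVis v (List.mem_cons.mpr (Or.inr hv))
        · exact fun v hv => inv1.qRoot v (List.mem_cons.mpr (Or.inr hv))
        · intro x hx hxq pp hpp
          by_cases hxu : x = u
          · subst hxu
            obtain ⟨h1, h2⟩ := pprop1 pp hpp
            exact ⟨h1, by rw [h2, hrootu]⟩
          · exact inv1.closure x hx (by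
              intro hmem
              rcases List.mem_cons.mp hmem with h | h
              · exact hxu h
              · exact hxq h) pp hpp
      have hcount' : s.2.length + (adj.keys.filter (fun k => !decide (k ∈ s.1.visited))).length < f := by
        have : (u :: rest).length = rest.length + 1 := by simp
        omega
      obtain ⟨inv2, sim2, ext2⟩ := ih s.1 s.2 sB.1 dropU sim1 hcount'
      have hAr : pvRunA adj (f + 1) st (u :: rest) = pvRunA adj f s.1 s.2 := rfl
      have hBr : pvRunB adj (f + 1) stB (u :: rest) = pvRunB adj f sB.1 sB.2 := rfl
      rw [hAr, hBr, qeq1]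
      exact ⟨inv2, sim2, pvExt_trans ext1 ext2⟩

theorem pvInv_retarget {adj : PySem.Dict Int (List (Int × Int))} {st : PvStA} {r r' : Int}
    (h : PvInv adj st [] r) : PvInv adj st [] r' := by
  exact ⟨h.nodupVis, h.visKeys, h.keysP, h.keysE, h.keysD, h.good, h.depthLt,
    fun v hv => absurd hv (List.not_mem_nil), fun v hv => absurd hv (List.not_mem_nil),
    fun x hx _ => h.closure x hx (List.not_mem_nil)⟩

def pvStepOutA (adj : PySem.Dict Int (List (Int × Int))) (st : PvStA) (root : Int) : PvStA :=
  if root ∈ st.visited then st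
  else pvRunA adj (adj.size + 1)
    { parent := st.parent.insert root none,
      parentEdge := st.parentEdge.insert root none,
      depth := st.depth.insert root 0,
      tree := st.tree,
      visited := PySem.Set.add st.visited root }
    [root]

def pvStepOutB (adj : PySem.Dict Int (List (Int × Int))) (st : PvStB) (root : Int) : PvStB :=
  if root ∈ st.visited then st
  else pvRunB adj (adj.size + 1)
    { tree := st.tree,
      visited := PySem.Set.add st.visited root,
      rootpath := st.rootpath.insert root [] }
    [root]

theorem pvRootInit (adj : PySem.Dict Int (List (Int × Int)))
    (root : Int) (hk : root ∈ adj.keys) (st : PvStA) (stB : PvStB)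
    (hinv : PvInv adj st [] 0) (hsim : PvSim st stB) (hv : root ∉ st.visited) :
    PvInv adj
      { parent := st.parent.insert root none,
        parentEdge := st.parentEdge.insert root none,
        depth := st.depth.insert root 0,
        tree := st.tree,
        visited := PySem.Set.add st.visited root } [root] root ∧
    PvSim
      { parent := st.parent.insert root none,
        parentEdge := st.parentEdge.insert root none,
        depth := st.depth.insert root 0,
        tree := st.tree,
        visited := PySem.Set.add st.visited root }
      { tree := stB.tree,
        visited := PySem.Set.add stB.visited root,
        rootpath := stB.rootpath.insert root [] } ∧
    PvExt st
      { parent := st.parent.insert root none,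
        parentEdge := st.parentEdge.insert root none,
        depth := st.depth.insert root 0,
        tree := st.tree,
        visited := PySem.Set.add st.visited root } := by
  set st1 : PvStA :=
    { parent := st.parent.insert root none,
      parentEdge := st.parentEdge.insert root none,
      depth := st.depth.insert root 0,
      tree := st.tree,
      visited := PySem.Set.add st.visited root } with hst1
  have hvisadd : st1.visited = st.visited ++ [root] := PySem.Set.add_of_not_mem hv
  have hne : ∀ w ∈ st.visited, w ≠ root := fun w hw h => hv (h ▸ hw)
  have hmemA' : ∀ w ∈ st.visited, w ∈ st1.visited := by
    intro w hw; rw [hvisadd]; exact List.mem_append.mpr (Or.inl hw)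
  have hvA' : root ∈ st1.visited := by rw [hvisadd]; simp
  have hExt : PvExt st st1 := by
    refine ⟨hmemA', fun y hy => hy, fun w hw => ?_⟩
    exact ⟨PySem.Dict.get?_insert_of_ne _ _ (hne w hw), PySem.Dict.get?_insert_of_ne _ _ (hne w hw),
      PySem.Dict.get?_insert_of_ne _ _ (hne w hw)⟩
  have hdP : st1.depth.get? root = some 0 := PySem.Dict.get?_insert_self _ _ _
  have hGoodr : PvGood st1 root :=
    Or.inl ⟨PySem.Dict.get?_insert_self _ _ _, PySem.Dict.get?_insert_self _ _ _, hdP⟩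
  have hrootr : pvRoot st1 root = root := pvRoot_of_root hdP
  have hcontP : st.parent.contains root = false := by
    rw [← Bool.not_eq_true, PySem.Dict.contains_iff_mem_keys, hinv.keysP]; exact hv
  have hcontE : st.parentEdge.contains root = false := by
    rw [← Bool.not_eq_true, PySem.Dict.contains_iff_mem_keys, hinv.keysE]; exact hv
  have hcontD : st.depth.contains root = false := by
    rw [← Bool.not_eq_true, PySem.Dict.contains_iff_mem_keys, hinv.keysD]; exact hv
  have hroot_pres : ∀ w ∈ st.visited, pvRoot st1 w = pvRoot st w :=
    fun w hw => pvRoot_ext hinv.good hExt hw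
  refine ⟨?_, ?_, hExt⟩
  · refine ⟨?_, ?_, ?_, ?_, ?_, ?_, ?_, ?_, ?_, ?_⟩
    · exact PySem.Set.nodup_add _ _ hinv.nodupVis
    · intro w hw
      rw [hvisadd] at hw
      rcases List.mem_append.mp hw with hw | hw
      · exact hinv.visKeys w hw
      · rw [List.mem_singleton.mp hw]; exact hk
    · show (st.parent.insert root none).keys = st1.visited
      rw [PySem.Dict.keys_insert_of_not_contains _ _ hcontP, hinv.keysP, hvisadd]
    · show (st.parentEdge.insert root none).keys = st1.visited
      rw [PySem.Dict.keys_insert_of_not_contains _ _ hcontE, hinv.keysE, hvisadd]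
    · show (st.depth.insert root 0).keys = st1.visited
      rw [PySem.Dict.keys_insert_of_not_contains _ _ hcontD, hinv.keysD, hvisadd]
    · intro w hw
      rw [hvisadd] at hw
      rcases List.mem_append.mp hw with hw | hw
      · exact pvGood_ext hExt hw (hinv.good w hw)
      · rw [List.mem_singleton.mp hw]; exact hGoodr
    · intro w hw
      have hlen : st1.visited.length = st.visited.length + 1 := by
        rw [hvisadd, List.length_append, List.length_singleton]
      rw [hlen, hvisadd] at *
      rcases List.mem_append.mp hw with hw | hw
      · rw [pvDepth_eq_of_ext hExt hw]
        have := hinv.depthLt w hw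
        push_cast
        omega
      · rw [List.mem_singleton.mp hw, pvDepth_some hdP]
        push_cast
        omega
    · intro w hw
      rw [List.mem_singleton.mp hw]; exact hvA'
    · intro w hw
      rw [List.mem_singleton.mp hw]; exact hrootr
    · intro x hx hxq pp hpp
      have hxold : x ∈ st.visited := by
        rw [hvisadd] at hx
        rcases List.mem_append.mp hx with hx | hx
        · exact hx
        · exact absurd (by rw [List.mem_singleton.mp hx]; simp : x ∈ [root]) hxq
      obtain ⟨h1, h2⟩ := hinv.closure x hxold (List.not_mem_nil) pp hpp
      exact ⟨hmemA' _ h1, by rw [hroot_pres _ h1, hroot_pres _ hxold, h2]⟩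
  · refine ⟨?_, ?_, ?_, ?_⟩
    · show PySem.Set.add stB.visited root = st1.visited
      rw [hsim.vis]
    · exact hsim.tree
    · show (stB.rootpath.insert root []).keys = st1.visited
      have hcontR : stB.rootpath.contains root = false := by
        rw [← Bool.not_eq_true, PySem.Dict.contains_iff_mem_keys, hsim.keysR]; exact hv
      rw [PySem.Dict.keys_insert_of_not_contains _ _ hcontR, hsim.keysR, hvisadd]
    · intro w hw
      rw [hvisadd] at hw
      rcases List.mem_append.mp hw with hw | hw
      · show (stB.rootpath.insert root []).get? w = _
        rw [PySem.Dict.get?_insert_of_ne _ _ (hne w hw), hsim.rp w hw,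
          pvPath_ext hinv.good hExt hw]
      · rw [List.mem_singleton.mp hw]
        show (stB.rootpath.insert root []).get? root = some (pvPath st1 root)
        rw [PySem.Dict.get?_insert_self]
        have : pvPath st1 root = [] := by
          unfold pvPath
          rw [pvDepth_some hdP]
          rfl
        rw [this]

theorem pvOuter_fold (adj : PySem.Dict Int (List (Int × Int))) (hadj : PvAdjOk adj)
    (hnd : adj.keys.Nodup) :
    ∀ (roots : List Int), (∀ k ∈ roots, k ∈ adj.keys) →
    ∀ (st : PvStA) (stB : PvStB), PvInv adj st [] 0 → PvSim st stB →
    PvInv adj (roots.foldl (pvStepOutA adj) st) [] 0 ∧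
    PvSim (roots.foldl (pvStepOutA adj) st) (roots.foldl (pvStepOutB adj) stB) ∧
    PvExt st (roots.foldl (pvStepOutA adj) st) ∧
    (∀ k ∈ roots, k ∈ (roots.foldl (pvStepOutA adj) st).visited) := by
  intro roots
  induction roots with
  | nil =>
    intro _ st stB hinv hsim
    exact ⟨hinv, hsim, pvExt_rfl st, by simp⟩
  | cons root t ih =>
    intro hks st stB hinv hsim
    rw [List.foldl_cons, List.foldl_cons]
    by_cases hv : root ∈ st.visited
    · have hA : pvStepOutA adj st root = st := by simp [pvStepOutA, hv]
      have hB : pvStepOutB adj stB root = stB := by simp [pvStepOutB, hsim.vis, hv]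
      rw [hA, hB]
      obtain ⟨i2, s2, e2, m2⟩ := ih (fun k hk => hks k (by simp [hk])) st stB hinv hsim
      refine ⟨i2, s2, e2, ?_⟩
      intro k hk
      rcases List.mem_cons.mp hk with rfl | hk
      · exact e2.vis hv
      · exact m2 k hk
    · have hA : pvStepOutA adj st root = pvRunA adj (adj.size + 1)
        { parent := st.parent.insert root none,
          parentEdge := st.parentEdge.insert root none,
          depth := st.depth.insert root 0,
          tree := st.tree,
          visited := PySem.Set.add st.visited root } [root] := by
        simp [pvStepOutA, hv]
      have hB : pvStepOutB adj stB root = pvRunB adj (adj.size + 1)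
        { tree := stB.tree,
          visited := PySem.Set.add stB.visited root,
          rootpath := stB.rootpath.insert root [] } [root] := by
        simp [pvStepOutB, hsim.vis, hv]
      rw [hA, hB]
      obtain ⟨inv1, sim1, ext1⟩ :=
        pvRootInit adj root (hks root (by simp)) st stB hinv hsim hv
      have hsz : adj.size = adj.keys.length := by
        show adj.items.length = (adj.items.map (·.1)).length
        rw [List.length_map]
      have hcnt : [root].length +
          (adj.keys.filter (fun k => !decide (k ∈ PySem.Set.add st.visited root))).length <
          adj.size + 1 := by
        have hlt : (adj.keys.filter (fun k => !decide (k ∈ PySem.Set.add st.visited root))).length <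
            adj.keys.length := by
          rw [List.length_filter_lt_length_iff_exists]
          refine ⟨root, hks root (by simp), ?_⟩
          simp [PySem.Set.mem_add]
        simp only [List.length_singleton]
        omega
      obtain ⟨inv2, sim2, ext2⟩ := pvRun_spec adj hadj hnd root (adj.size + 1) _ [root] _ inv1 sim1 hcnt
      obtain ⟨i3, s3, e3, m3⟩ := ih (fun k hk => hks k (by simp [hk])) _ _ (pvInv_retarget inv2) sim2
      refine ⟨i3, s3, pvExt_trans ext1 (pvExt_trans ext2 e3), ?_⟩
      intro k hk
      rcases List.mem_cons.mp hk with rfl | hk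
      · exact e3.vis (ext2.vis (inv1.qVis k (by simp)))
      · exact m3 k hk

theorem pvBfs_spec (edges : List (Int × Int)) :
    PvInv (pvAdj edges) (pvBfsA edges) [] 0 ∧ PvSim (pvBfsA edges) (pvBfsB edges) ∧
    (∀ k ∈ (pvAdj edges).keys, k ∈ (pvBfsA edges).visited) := by
  have hadj := pvAdjOk_pvAdj edges
  have hnd := pvAdj_keys_nodup edges
  have hA : pvBfsA edges = (PySem.List.sorted (pvAdj edges).keys (fun x => x) false).foldl
      (pvStepOutA (pvAdj edges)) ⟨PySem.Dict.empty, PySem.Dict.empty, PySem.Dict.empty, [], []⟩ := rfl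
  have hB : pvBfsB edges = (PySem.List.sorted (pvAdj edges).keys (fun x => x) false).foldl
      (pvStepOutB (pvAdj edges)) ⟨[], [], PySem.Dict.empty⟩ := rfl
  have hinit : PvInv (pvAdj edges)
      ⟨PySem.Dict.empty, PySem.Dict.empty, PySem.Dict.empty, [], []⟩ [] 0 := by
    refine ⟨List.nodup_nil, ?_, ?_, ?_, ?_, ?_, ?_, ?_, ?_, ?_⟩ <;>
      first
        | (intro v hv; cases hv)
        | rfl
  have hsim0 : PvSim ⟨PySem.Dict.empty, PySem.Dict.empty, PySem.Dict.empty, [], []⟩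
      ⟨[], [], PySem.Dict.empty⟩ := by
    refine ⟨rfl, rfl, rfl, ?_⟩
    intro v hv; cases hv
  obtain ⟨i, si, e, m⟩ := pvOuter_fold (pvAdj edges) hadj hnd
    (PySem.List.sorted (pvAdj edges).keys (fun x => x) false)
    (fun k hk => (PySem.List.mem_sorted _ _ _ _).mp hk) _ _ hinit hsim0
  rw [hA, hB]
  exact ⟨i, si, fun k hk => m k ((PySem.List.mem_sorted _ _ _ _).mpr hk)⟩

-- ---- final assembly ----
theorem pvNodup_length_le (l1 l2 : List Int) (h : l1.Nodup) (hs : l1 ⊆ l2) :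
    l1.length ≤ l2.length := by
  classical
  calc l1.length = l1.toFinset.card := (List.toFinset_card_of_nodup h).symm
    _ ≤ l2.toFinset.card := Finset.card_le_card (by intro x hx; simp at hx ⊢; exact hs hx)
    _ ≤ l2.length := l2.toFinset_card_le

theorem pvVec_eq (st : PvStA) (stB : PvStB) (hgs : ∀ w ∈ st.visited, PvGood st w)
    (hsim : PvSim st stB) (u v : Int) (hu : u ∈ st.visited) (hv : v ∈ st.visited)
    (hr : pvRoot st v = pvRoot st u) (fuel : Nat)
    (hfu : (pvDepth st u).toNat < fuel) (hfv : (pvDepth st v).toNat < fuel) (w : List Int) :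
    pvClimbBoth st.parentEdge st.parent fuel
      (pvClimbUp st.parentEdge st.parent st.depth fuel u v w).1
      (pvClimbUp st.parentEdge st.parent st.depth fuel v
        (pvClimbUp st.parentEdge st.parent st.depth fuel u v w).1
        (pvClimbUp st.parentEdge st.parent st.depth fuel u v w).2).1
      (pvClimbUp st.parentEdge st.parent st.depth fuel v
        (pvClimbUp st.parentEdge st.parent st.depth fuel u v w).1
        (pvClimbUp st.parentEdge st.parent st.depth fuel u v w).2).2 =
    (stB.rootpath.getD u [] ++ stB.rootpath.getD v []).foldl pvXor1 w := by
  have hdu0 : 0 ≤ pvDepth st u := pvDepth_nonneg (hgs u hu)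
  have hdv0 : 0 ≤ pvDepth st v := pvDepth_nonneg (hgs v hv)
  set k1 := (pvDepth st u - pvDepth st v).toNat with hk1
  have hc1 := pvChain st hgs k1 u hu (by omega)
  obtain ⟨ha1v, ha1d, ha1r, ha1p, ha1nn⟩ := hc1
  set a1 := pvRootF st k1 u with ha1
  rw [pvClimbUp_spec st hgs v hv fuel u w hu (by omega)]
  simp only
  set k2 := (pvDepth st v - pvDepth st a1).toNat with hk2
  have hc2 := pvChain st hgs k2 v hv (by omega)
  obtain ⟨hb1v, hb1d, hb1r, hb1p, hb1nn⟩ := hc2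
  set b1 := pvRootF st k2 v with hb1
  rw [pvClimbUp_spec st hgs a1 ha1v fuel v _ hv (by omega)]
  simp only
  have hdep : pvDepth st a1 = pvDepth st b1 := by omega
  have hroots : pvRoot st a1 = pvRoot st b1 := by
    rw [ha1r, hb1r, hr]
  rw [pvClimbBoth_spec st hgs fuel a1 b1 _ ha1v hb1v hdep hroots (by omega)]
  -- both sides are toggle lists over rearranged concatenations
  have hrpu : stB.rootpath.getD u [] = pvPath st u := by
    rw [PySem.Dict.getD_eq_get?_getD, hsim.rp u hu]; rfl
  have hrpv : stB.rootpath.getD v [] = pvPath st v := by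
    rw [PySem.Dict.getD_eq_get?_getD, hsim.rp v hv]; rfl
  rw [hrpu, hrpv, ha1p, hb1p]
  have hPa := pvPath_nonneg hgs ha1v
  have hPb := pvPath_nonneg hgs hb1v
  have hU1 := ha1nn
  have hU2 := hb1nn
  simp only [List.foldl_append]
  rw [pvTogList_comm (pvPathF st k2 v) (pvPath st a1) hU2 hPa]

theorem pvBasis_eq (edges : List (Int × Int)) :
    fundamental_cycle_basis edges = fundamental_cycle_basis_alt edges := by
  obtain ⟨inv, sim, allk⟩ := pvBfs_spec edges
  have hadj := pvAdjOk_pvAdj edges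
  unfold fundamental_cycle_basis fundamental_cycle_basis_alt
  apply PySem.List.foldl_congr_mem
  intro acc p hp
  obtain ⟨k, hk, rfl⟩ := (PySem.List.mem_enumerate_iff _ _ _).mp hp
  by_cases ht : ((0 : Int) + (k : Int), edges[k]).1 ∈ (pvBfsA edges).tree
  · have htB : ((0 : Int) + (k : Int), edges[k]).1 ∈ (pvBfsB edges).tree := by
      rw [sim.tree]; exact ht
    rw [if_pos ht, if_pos htB]
  · have htB : ((0 : Int) + (k : Int), edges[k]).1 ∉ (pvBfsB edges).tree := by
      rw [sim.tree]; exact ht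
    rw [if_neg ht, if_neg htB]
    -- membership of endpoints
    have hmemu : (edges[k].2, (k : Int)) ∈ (pvAdj edges).getD edges[k].1 [] :=
      pvAdj_endpoint_mem edges k hk
    have hvk : edges[k].2 ∈ (pvAdj edges).keys := (hadj _ _ hmemu).2.1
    have hmemv : (edges[k].1, (k : Int)) ∈ (pvAdj edges).getD edges[k].2 [] := by
      have := (hadj _ _ hmemu).1
      simpa using this
    have huk : edges[k].1 ∈ (pvAdj edges).keys := (hadj _ _ hmemv).2.1
    have hu_vis : edges[k].1 ∈ (pvBfsA edges).visited := allk _ huk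
    have hv_vis : edges[k].2 ∈ (pvBfsA edges).visited := allk _ hvk
    have hroots := (inv.closure _ hu_vis (List.not_mem_nil) _ hmemu).2
    simp only at hroots
    -- depth bounds
    have hvk2 : (pvBfsA edges).visited.length ≤ (pvAdj edges).keys.length :=
      pvNodup_length_le _ _ inv.nodupVis (fun x hx => inv.visKeys x hx)
    have hsz := pvAdj_size_le edges
    have hbu := inv.depthLt _ hu_vis
    have hbv := inv.depthLt _ hv_vis
    dsimp only
    rw [pvVec_eq (pvBfsA edges) (pvBfsB edges) inv.good sim edges[k].1 edges[k].2
      hu_vis hv_vis hroots (2 * edges.length + 1) (by omega) (by omega)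
      (PySem.List.pySetD (List.replicate edges.length 0) (0 + (k : Int)) 1)]

-- ===== VERDICT (by name: the statement is the Claim_ definition above) =====
theorem fundamental_cycle_basis_spec : Claim_equal_fundamental_cycle_basis := by
  intro edges _
  unfold Spec_fundamental_cycle_basis
  exact pvBasis_eq edges
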